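-- pv_equiv track=rewrite | github.com/CyberDataLab/drowsiness-hfl | Experimentation_Centralized.py | one_per_company
-- ===== SOURCE A (Python) =====
-- DRIVERS_IDS = {
--     1: [3,4,5,12,  2,8,  1],
--     2: [13,14,    6,7,10,11,16],
--     3: [15,18,  9,17,20,21,  19]
-- }
--
-- def one_per_company(comb):
--     conds = {
--         1: False,
--         2: False,
--         3: False
--     }
--
--     for cid in comb:
--         for empid in DRIVERS_IDS:
--             if(cid in DRIVERS_IDS[empid]):
--                 conds[empid] = True
--
--     return conds[1] and conds[2] and conds[3]
-- ===== SOURCE B (Python) =====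
-- DRIVERS_IDS = {
--     1: [3,4,5,12,  2,8,  1],
--     2: [13,14,    6,7,10,11,16],
--     3: [15,18,  9,17,20,21,  19]
-- }
--
-- def one_per_company(comb):
--     members = set(comb)
--     return all(not members.isdisjoint(ids) for ids in DRIVERS_IDS.values())
-- ===== Notes on version B (the rewrite author's own statement) =====
-- stated objective: simpler
-- what changed: B loops over the companies once, testing each company's driver list for intersection with set(comb), instead of A's element-outer nested loops maintaining per-company boolean flags.
import Mathlib
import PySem

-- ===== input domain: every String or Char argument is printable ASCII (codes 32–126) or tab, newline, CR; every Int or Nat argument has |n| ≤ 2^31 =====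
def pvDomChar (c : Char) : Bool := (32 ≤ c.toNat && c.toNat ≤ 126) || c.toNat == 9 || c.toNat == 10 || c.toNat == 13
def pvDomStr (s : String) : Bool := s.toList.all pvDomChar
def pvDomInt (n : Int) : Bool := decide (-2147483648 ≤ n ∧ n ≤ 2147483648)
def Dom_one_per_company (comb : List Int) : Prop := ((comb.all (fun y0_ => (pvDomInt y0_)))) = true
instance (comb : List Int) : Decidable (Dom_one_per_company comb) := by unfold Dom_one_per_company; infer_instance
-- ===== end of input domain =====

-- B replaces A's element-outer nested loops with one intersection test per company (simpler decomposition, same results).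

-- ===== PORT A =====
def driversIds : PySem.Dict Int (List Int) :=
  PySem.Dict.mk [(1, [3,4,5,12,2,8,1]), (2, [13,14,6,7,10,11,16]), (3, [15,18,9,17,20,21,19])]

def one_per_company (comb : List Int) : Bool :=
  let conds0 : PySem.Dict Int Bool := PySem.Dict.mk [(1, false), (2, false), (3, false)]
  let conds := comb.foldl (fun conds cid =>
    driversIds.keys.foldl (fun conds empid =>
      if (driversIds.getD empid []).contains cid then conds.insert empid true
      else conds) conds) conds0
  conds.getD 1 false && conds.getD 2 false && conds.getD 3 false

-- ===== PORT B =====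
def one_per_company_alt (comb : List Int) : Bool :=
  let members : PySem.Set Int := PySem.Set.ofList comb
  driversIds.values.all (fun ids => !(PySem.Set.isdisjoint members ids))

-- ===== PRECONDITION & SPEC =====
def Spec_one_per_company (comb : List Int) (out : Bool) : Prop := out = one_per_company_alt comb
instance (comb : List Int) (out : Bool) : Decidable (Spec_one_per_company comb out) := by unfold Spec_one_per_company; infer_instance

-- ===== CLAIM (what is proved, stated in full; the proofs are below) =====
def Claim_equal_one_per_company : Prop := ∀ (comb : List Int), Dom_one_per_company comb → Spec_one_per_company comb (one_per_company comb)

-- ===== LEMMAS AND PROOFS =====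

def pvL1 : List Int := [3,4,5,12,2,8,1]
def pvL2 : List Int := [13,14,6,7,10,11,16]
def pvL3 : List Int := [15,18,9,17,20,21,19]

-- One iteration of A's outer loop on a conds dict in its invariant shape.
lemma one_per_company_step (c : Int) (b1 b2 b3 : Bool) :
    driversIds.keys.foldl (fun conds empid =>
      if (driversIds.getD empid []).contains c then conds.insert empid true
      else conds) (PySem.Dict.mk [(1, b1), (2, b2), (3, b3)]) =
    PySem.Dict.mk [(1, b1 || pvL1.contains c), (2, b2 || pvL2.contains c),
                   (3, b3 || pvL3.contains c)] := by
  rw [show driversIds.keys = [1, 2, 3] by decide]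
  simp only [List.foldl_cons, List.foldl_nil,
    show driversIds.getD 1 [] = pvL1 by decide,
    show driversIds.getD 2 [] = pvL2 by decide,
    show driversIds.getD 3 [] = pvL3 by decide]
  by_cases h1 : pvL1.contains c = true <;>
  by_cases h2 : pvL2.contains c = true <;>
  by_cases h3 : pvL3.contains c = true <;>
  simp only [h1, h2, h3, Bool.not_eq_true] at * <;>
  simp [PySem.Dict.insert]

-- A's whole loop, with the conds dict generalized to an arbitrary triple of flags.
lemma one_per_company_loop (comb : List Int) (b1 b2 b3 : Bool) :
    comb.foldl (fun conds cid =>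
      driversIds.keys.foldl (fun conds empid =>
        if (driversIds.getD empid []).contains cid then conds.insert empid true
        else conds) conds) (PySem.Dict.mk [(1, b1), (2, b2), (3, b3)]) =
    PySem.Dict.mk [(1, b1 || comb.any (pvL1.contains ·)),
                   (2, b2 || comb.any (pvL2.contains ·)),
                   (3, b3 || comb.any (pvL3.contains ·))] := by
  induction comb generalizing b1 b2 b3 with
  | nil => simp
  | cons c cs ih =>
    rw [List.foldl_cons, one_per_company_step, ih]
    simp [Bool.or_assoc]

lemma not_isdisjoint_ofList (comb ids : List Int) :
    (!(PySem.Set.isdisjoint (PySem.Set.ofList comb) ids)) = comb.any (ids.contains ·) := by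
  rw [Bool.eq_iff_iff]
  constructor
  · intro h
    rw [Bool.not_eq_eq_eq_not, Bool.not_true, ← Bool.not_eq_true, PySem.Set.isdisjoint_iff] at h
    push_neg at h
    obtain ⟨x, hx, hm⟩ := h
    rw [PySem.Set.mem_ofList] at hx
    simp only [List.any_eq_true, List.contains_iff_mem]
    exact ⟨x, hx, hm⟩
  · intro h
    simp only [List.any_eq_true, List.contains_iff_mem] at h
    obtain ⟨x, hx, hm⟩ := h
    rw [Bool.not_eq_eq_eq_not, Bool.not_true, ← Bool.not_eq_true, PySem.Set.isdisjoint_iff]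
    push_neg
    exact ⟨x, (PySem.Set.mem_ofList _ _).2 hx, hm⟩

-- ===== VERDICT (by name: the statement is the Claim_ definition above) =====
theorem one_per_company_spec : Claim_equal_one_per_company := by
  intro comb _
  unfold Spec_one_per_company
  simp only [one_per_company, one_per_company_alt]
  rw [one_per_company_loop]
  rw [show driversIds.values = [pvL1, pvL2, pvL3] by decide]
  simp [not_isdisjoint_ofList, PySem.Dict.getD, PySem.Dict.get?_mk_cons, Bool.and_assoc]
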